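-- pv_equiv track=rewrite | github.com/CodyDBrown/AOC | 2017/day01/main.py | nextCheck
-- ===== SOURCE A (Python) =====
-- def nextCheck(numbers):
--     answer = 0
--     for n in range(len(numbers)-1):
--         if(numbers[n] == numbers[n+1]):
--             answer += int(numbers[n])
--     # List is circular so I need to check first and last numbers
--     if(numbers[0] == numbers[-1]):
--         answer += int(numbers[0])
--
--     return answer
-- ===== SOURCE B (Python) =====
-- def nextCheck(numbers):
--     # Run-length encode the input, then score runs: a run of length k holds
--     # k-1 equal adjacent pairs; the circular wrap is handled by merging the
--     # first run into the last when their characters match.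
--     runs = []
--     for ch in numbers:
--         if runs and runs[-1][0] == ch:
--             runs[-1][1] += 1
--         else:
--             runs.append([ch, 1])
--     if len(runs) == 1:
--         c, k = runs[0]
--         return int(c) * k
--     if runs[0][0] == runs[-1][0]:
--         runs[-1][1] += runs[0][1]
--         del runs[0]
--     return sum(int(c) * (k - 1) for c, k in runs if k > 1)
-- ===== Notes on version B (the rewrite author's own statement) =====
-- stated objective: alternative
-- what changed: B run-length encodes the input first, merges the first run into the last one to close the circle, and scores each run of length k as digit*(k-1), instead of A's per-index comparison loop with a separate wrap branch.
import Mathlib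
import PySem

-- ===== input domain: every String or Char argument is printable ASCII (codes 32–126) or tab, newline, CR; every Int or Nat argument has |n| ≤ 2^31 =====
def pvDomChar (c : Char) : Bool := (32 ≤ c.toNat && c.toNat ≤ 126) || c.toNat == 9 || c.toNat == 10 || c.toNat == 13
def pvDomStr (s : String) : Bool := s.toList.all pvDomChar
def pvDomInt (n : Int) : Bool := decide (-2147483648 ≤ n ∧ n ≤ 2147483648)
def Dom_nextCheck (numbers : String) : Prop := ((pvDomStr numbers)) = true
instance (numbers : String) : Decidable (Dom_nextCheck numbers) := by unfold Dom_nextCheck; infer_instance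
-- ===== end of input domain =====

-- B run-length encodes the input, merges the first run into the last to close the circle,
-- and scores each run of length k as digit*(k-1), replacing A's per-index comparison loop
-- with its separate wrap branch (objective: alternative).

-- int(ch) for a single character; the default 0 is only taken where Python's int() raises ValueError (excluded by Pre_)
def pvIntChar (c : Char) : Int := (PySem.Int.ofChars? [c]).getD 0

-- ===== PORT A =====
def nextCheck (numbers : String) : Int :=
  let cs := numbers.toList
  let answer : Int :=
    (PySem.List.pyRange 0 ((cs.length : Int) - 1) 1).foldl
      (fun acc n =>
        if PySem.List.pyGetD cs n ' ' = PySem.List.pyGetD cs (n + 1) ' '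
        then acc + pvIntChar (PySem.List.pyGetD cs n ' ')
        else acc) 0
  if PySem.List.pyGetD cs 0 ' ' = PySem.List.pyGetD cs (-1) ' '
  then answer + pvIntChar (PySem.List.pyGetD cs 0 ' ')
  else answer

-- ===== PORT B =====
-- one step of Source B's run-building loop: increment the most recent run or open a new one
-- (the most recent run is kept at the HEAD of the accumulator; the port reverses at the end)
def pvStep (acc : List (Char × Nat)) (ch : Char) : List (Char × Nat) :=
  match acc with
  | (c, k) :: rest => if c = ch then (c, k + 1) :: rest else (ch, 1) :: (c, k) :: rest
  | [] => [(ch, 1)]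

def nextCheck_alt (numbers : String) : Int :=
  let runs := (numbers.toList.foldl pvStep []).reverse
  if runs.length = 1 then
    pvIntChar (runs.headD (' ', 0)).1 * ((runs.headD (' ', 0)).2 : Int)
  else
    let first := runs.headD (' ', 0)
    let last := runs.getLastD (' ', 0)
    let runs' :=
      if first.1 = last.1 then runs.tail.dropLast ++ [(last.1, last.2 + first.2)]
      else runs
    ((runs'.filter (fun p => 1 < p.2)).map
      (fun p => pvIntChar p.1 * ((p.2 : Int) - 1))).sum

-- ===== PRECONDITION & SPEC =====
-- Pre_ excludes exactly the inputs where the Python A raises: the empty string (IndexError at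
-- numbers[0]) and strings in which some character equal to its circular successor is not an
-- ASCII digit (ValueError from int()).
def Pre_nextCheck (numbers : String) : Prop :=
  numbers.toList ≠ [] ∧
  ∀ i : Fin numbers.toList.length,
    numbers.toList[i] = numbers.toList[((i : Nat) + 1) % numbers.toList.length]'
      (Nat.mod_lt _ (Nat.lt_of_le_of_lt (Nat.zero_le _) i.isLt)) →
    PySem.Chars.isdigit numbers.toList[i] = true
instance (numbers : String) : Decidable (Pre_nextCheck numbers) := by
  unfold Pre_nextCheck; infer_instance
def pvWitness_nextCheck : String := "11"

def Spec_nextCheck (numbers : String) (out : Int) : Prop := out = nextCheck_alt numbers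
instance (numbers : String) (out : Int) : Decidable (Spec_nextCheck numbers out) := by unfold Spec_nextCheck; infer_instance

-- ===== CLAIM (what is proved, stated in full; the proofs are below) =====
def Claim_equal_nextCheck : Prop := ∀ (numbers : String), Dom_nextCheck numbers → Pre_nextCheck numbers → Spec_nextCheck numbers (nextCheck numbers)

-- ===== LEMMAS AND PROOFS =====

-- sum of int over adjacent equal pairs (A's linear part)
def linSum : List Char → Int
  | a :: b :: t => (if a = b then pvIntChar a else 0) + linSum (b :: t)
  | _ => 0

-- the run list of (d repeated k times) ++ cs, built left to right
def runsFrom : Char → Nat → List Char → List (Char × Nat)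
  | d, k, [] => [(d, k)]
  | d, k, c :: cs => if d = c then runsFrom d (k + 1) cs else (d, k) :: runsFrom c 1 cs

theorem pv_getLastD_eq {α : Type} (l : List α) (d : α) (h : l ≠ []) :
    l.getLastD d = l.getLast h := by
  cases l with
  | nil => exact absurd rfl h
  | cons a t => simp [List.getLastD_eq_getLast?, List.getLast?_eq_some_getLast]

-- A's nat-index loop over range(len-1) is the fold over adjacent pairs
theorem pv_foldNat (cs : List Char) (init : Int) :
    (List.range (cs.length - 1)).foldl
        (fun acc k => if cs.getD k ' ' = cs.getD (k + 1) ' '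
                      then acc + pvIntChar (cs.getD k ' ') else acc) init
      = (cs.zip cs.tail).foldl (fun acc p => if p.1 = p.2 then acc + pvIntChar p.1 else acc) init := by
  induction cs generalizing init with
  | nil => simp
  | cons a rest ih =>
    cases rest with
    | nil => simp
    | cons b rest' =>
      simp only [List.length_cons, Nat.add_sub_cancel, List.range_succ_eq_map,
        List.foldl_cons, List.foldl_map, Nat.succ_eq_add_one, List.getD_cons_zero,
        List.getD_cons_succ, List.zip_cons_cons, List.tail_cons]
      have := ih (init := if a = b then init + pvIntChar a else init)
      simp only [List.length_cons, Nat.add_sub_cancel, List.tail_cons] at this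
      exact this

-- the zip fold is linSum
theorem pv_zipfold_linSum (cs : List Char) :
    ∀ init : Int,
      (cs.zip cs.tail).foldl (fun acc p => if p.1 = p.2 then acc + pvIntChar p.1 else acc) init
        = init + linSum cs := by
  induction cs with
  | nil => intro init; simp [linSum]
  | cons a rest ih =>
    intro init
    cases rest with
    | nil => simp [linSum]
    | cons b t =>
      simp only [List.tail_cons, List.zip_cons_cons, List.foldl_cons]
      have hih := ih (if a = b then init + pvIntChar a else init)
      simp only [List.tail_cons] at hih
      rw [hih, show linSum (a :: b :: t) = (if a = b then pvIntChar a else 0) + linSum (b :: t)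
        from by simp [linSum]]
      split_ifs <;> ring

theorem pv_A_eq (numbers : String) (a : Char) (rest : List Char)
    (h : numbers.toList = a :: rest) :
    nextCheck numbers
      = linSum (a :: rest)
        + (if a = (a :: rest).getLast (List.cons_ne_nil a rest) then pvIntChar a else 0) := by
  have hA :
      (PySem.List.pyRange 0 (((a :: rest).length : Int) - 1) 1).foldl
        (fun acc n =>
          if PySem.List.pyGetD (a :: rest) n ' ' = PySem.List.pyGetD (a :: rest) (n + 1) ' '
          then acc + pvIntChar (PySem.List.pyGetD (a :: rest) n ' ')
          else acc) 0 = linSum (a :: rest) := by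
    rw [PySem.List.pyRange_one, List.foldl_map]
    have hlen' : ((((a :: rest).length : Int)) - 1 - 0).toNat = (a :: rest).length - 1 := by
      simp only [List.length_cons]; omega
    rw [hlen']
    refine (List.foldl_ext _
      (fun acc k => if (a :: rest).getD k ' ' = (a :: rest).getD (k + 1) ' '
                    then acc + pvIntChar ((a :: rest).getD k ' ') else acc) 0 ?_).trans ?_
    · intro acc k _
      have e2 : ((k : Int) + 1) = (((k + 1 : Nat)) : Int) := by push_cast; ring
      simp only [zero_add]
      rw [e2, PySem.List.pyGetD_natCast, PySem.List.pyGetD_natCast]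
    · rw [pv_foldNat, pv_zipfold_linSum]; ring
  have h0 : PySem.List.pyGetD (a :: rest) 0 ' ' = a := by simp
  have hm1 : PySem.List.pyGetD (a :: rest) (-1) ' '
      = (a :: rest).getLast (List.cons_ne_nil a rest) :=
    PySem.List.pyGetD_neg_one (a :: rest) ' ' (List.cons_ne_nil a rest)
  simp only [nextCheck, h]
  rw [hA, h0, hm1]
  split_ifs <;> ring

-- Source B's loop, started on a nonempty reversed-run accumulator, computes runsFrom
theorem pv_foldl_step (cs : List Char) :
    ∀ (d : Char) (k : Nat) (rest : List (Char × Nat)),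
      List.foldl pvStep ((d, k) :: rest) cs = (runsFrom d k cs).reverse ++ rest := by
  induction cs with
  | nil => intro d k rest; simp [runsFrom]
  | cons c cs ih =>
    intro d k rest
    by_cases hdc : d = c
    · subst hdc
      have hstep : pvStep ((d, k) :: rest) d = (d, k + 1) :: rest := by simp [pvStep]
      rw [List.foldl_cons, hstep, ih,
        show runsFrom d k (d :: cs) = runsFrom d (k + 1) cs from by simp [runsFrom]]
    · have hstep : pvStep ((d, k) :: rest) c = (c, 1) :: (d, k) :: rest := by simp [pvStep, hdc]
      rw [List.foldl_cons, hstep, ih,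
        show runsFrom d k (c :: cs) = (d, k) :: runsFrom c 1 cs from by simp [runsFrom, hdc]]
      simp [List.append_assoc]

theorem pv_runsFrom_ne_nil (cs : List Char) : ∀ d k, runsFrom d k cs ≠ [] := by
  induction cs with
  | nil => intro d k; simp [runsFrom]
  | cons c cs ih =>
    intro d k
    by_cases hdc : d = c
    · subst hdc
      rw [show runsFrom d k (d :: cs) = runsFrom d (k + 1) cs from by simp [runsFrom]]
      exact ih d (k + 1)
    · simp [runsFrom, hdc]

theorem pv_head (cs : List Char) :
    ∀ d k, ((runsFrom d k cs).headD (' ', 0)).1 = d := by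
  induction cs with
  | nil => intro d k; simp [runsFrom]
  | cons c cs ih =>
    intro d k
    by_cases hdc : d = c
    · subst hdc
      rw [show runsFrom d k (d :: cs) = runsFrom d (k + 1) cs from by simp [runsFrom]]
      exact ih d (k + 1)
    · simp [runsFrom, hdc]

theorem pv_getLastD_indep {α : Type} (l : List α) (h : l ≠ []) (d e : α) :
    l.getLastD d = l.getLastD e := by
  rw [pv_getLastD_eq l d h, pv_getLastD_eq l e h]

theorem pv_last (cs : List Char) :
    ∀ d k, ((runsFrom d k cs).getLastD (' ', 0)).1
      = (d :: cs).getLast (List.cons_ne_nil d cs) := by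
  induction cs with
  | nil => intro d k; simp [runsFrom]
  | cons c cs ih =>
    intro d k
    by_cases hdc : d = c
    · subst hdc
      rw [show runsFrom d k (d :: cs) = runsFrom d (k + 1) cs from by simp [runsFrom],
        ih d (k + 1), List.getLast_cons (List.cons_ne_nil d cs)]
    · rw [show runsFrom d k (c :: cs) = (d, k) :: runsFrom c 1 cs from by simp [runsFrom, hdc],
        List.getLastD_cons, pv_getLastD_indep _ (pv_runsFrom_ne_nil cs c 1) (d, k) (' ', 0),
        ih c 1, List.getLast_cons (List.cons_ne_nil c cs)]

theorem pv_runsum (cs : List Char) :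
    ∀ d k, ((runsFrom d k cs).map (fun p => pvIntChar p.1 * ((p.2 : Int) - 1))).sum
      = pvIntChar d * ((k : Int) - 1) + linSum (d :: cs) := by
  induction cs with
  | nil => intro d k; simp [runsFrom, linSum]
  | cons c cs ih =>
    intro d k
    by_cases hdc : d = c
    · subst hdc
      rw [show runsFrom d k (d :: cs) = runsFrom d (k + 1) cs from by simp [runsFrom],
        ih d (k + 1),
        show linSum (d :: d :: cs) = pvIntChar d + linSum (d :: cs) from by simp [linSum]]
      push_cast
      ring
    · rw [show runsFrom d k (c :: cs) = (d, k) :: runsFrom c 1 cs from by simp [runsFrom, hdc]]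
      simp only [List.map_cons, List.sum_cons]
      rw [ih c 1,
        show linSum (d :: c :: cs) = linSum (c :: cs) from by simp [linSum, hdc]]
      push_cast
      ring

theorem pv_counts (cs : List Char) :
    ∀ d k, 0 < k → ∀ p ∈ runsFrom d k cs, 0 < p.2 := by
  induction cs with
  | nil =>
    intro d k hk p hp
    simp only [runsFrom, List.mem_singleton] at hp
    subst hp; exact hk
  | cons c cs ih =>
    intro d k hk p hp
    by_cases hdc : d = c
    · subst hdc
      rw [show runsFrom d k (d :: cs) = runsFrom d (k + 1) cs from by simp [runsFrom]] at hp
      exact ih d (k + 1) (Nat.succ_pos k) p hp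
    · rw [show runsFrom d k (c :: cs) = (d, k) :: runsFrom c 1 cs
        from by simp [runsFrom, hdc]] at hp
      rcases List.mem_cons.mp hp with h | h
      · subst h; exact hk
      · exact ih c 1 Nat.one_pos p h

theorem pv_filter_sum (rs : List (Char × Nat)) (h : ∀ p ∈ rs, 0 < p.2) :
    ((rs.filter (fun p => 1 < p.2)).map (fun p => pvIntChar p.1 * ((p.2 : Int) - 1))).sum
      = (rs.map (fun p => pvIntChar p.1 * ((p.2 : Int) - 1))).sum := by
  induction rs with
  | nil => simp
  | cons r rs ih =>
    have hr : 0 < r.2 := h r (List.mem_cons_self)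
    have hrest := ih (fun p hp => h p (List.mem_cons_of_mem r hp))
    by_cases h1 : 1 < r.2
    · simp only [List.filter_cons, h1, decide_true, if_true, List.map_cons, List.sum_cons, hrest]
    · have hone : r.2 = 1 := by omega
      rw [List.filter_cons, if_neg (by simp [hone]), hrest]
      have hz : pvIntChar r.1 * ((r.2 : Int) - 1) = 0 := by rw [hone]; push_cast; ring
      simp [hz]

theorem pv_single (cs : List Char) :
    ∀ d k, (runsFrom d k cs).length = 1 → runsFrom d k cs = [(d, k + cs.length)] := by
  induction cs with
  | nil => intro d k _; simp [runsFrom]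
  | cons c cs ih =>
    intro d k hlen
    by_cases hdc : d = c
    · subst hdc
      rw [show runsFrom d k (d :: cs) = runsFrom d (k + 1) cs from by simp [runsFrom]] at hlen ⊢
      rw [ih d (k + 1) hlen]
      have harith : k + 1 + cs.length = k + (cs.length + 1) := by omega
      simp [List.length_cons, harith]
    · exfalso
      rw [show runsFrom d k (c :: cs) = (d, k) :: runsFrom c 1 cs
        from by simp [runsFrom, hdc]] at hlen
      simp only [List.length_cons] at hlen
      have h1 : 0 < (runsFrom c 1 cs).length :=
        List.length_pos_iff.mpr (pv_runsFrom_ne_nil cs c 1)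
      omega

theorem pv_merge (t : List (Char × Nat)) (r0 : Char × Nat) (h : t ≠ [])
    (hc : r0.1 = (t.getLast h).1) :
    (((t.dropLast ++ [((t.getLast h).1, (t.getLast h).2 + r0.2)]).map
        (fun p => pvIntChar p.1 * ((p.2 : Int) - 1))).sum)
      = ((r0 :: t).map (fun p => pvIntChar p.1 * ((p.2 : Int) - 1))).sum + pvIntChar r0.1 := by
  conv_rhs => rw [← List.dropLast_append_getLast h]
  simp only [List.map_append, List.map_cons, List.sum_append, List.sum_cons, List.map_nil,
    List.sum_nil, hc]
  push_cast
  ring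

theorem pv_B_eq (numbers : String) (a : Char) (rest : List Char)
    (h : numbers.toList = a :: rest) :
    nextCheck_alt numbers
      = linSum (a :: rest)
        + (if a = (a :: rest).getLast (List.cons_ne_nil a rest) then pvIntChar a else 0) := by
  have hruns : (List.foldl pvStep [] (a :: rest)).reverse = runsFrom a 1 rest := by
    rw [show List.foldl pvStep [] (a :: rest) = List.foldl pvStep [(a, 1)] rest from rfl,
      pv_foldl_step rest a 1 []]
    simp
  simp only [nextCheck_alt, h, hruns]
  by_cases hlen : (runsFrom a 1 rest).length = 1
  · -- single run: all characters equal
    rw [if_pos hlen]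
    have hsingle : runsFrom a 1 rest = [(a, 1 + rest.length)] := pv_single rest a 1 hlen
    have hlast : a = (a :: rest).getLast (List.cons_ne_nil a rest) := by
      have h2 := pv_last rest a 1
      rw [hsingle] at h2
      simpa using h2
    have hsum0 := pv_runsum rest a 1
    rw [hsingle] at hsum0
    simp only [List.map_cons, List.map_nil, List.sum_cons, List.sum_nil, add_zero] at hsum0
    rw [hsingle]
    simp only [List.headD_cons]
    rw [if_pos hlast]
    push_cast at hsum0 ⊢
    linear_combination hsum0
  · rw [if_neg hlen]
    obtain ⟨r0, t, hrt⟩ : ∃ r0 t, runsFrom a 1 rest = r0 :: t := by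
      cases hr : runsFrom a 1 rest with
      | nil => exact absurd hr (pv_runsFrom_ne_nil rest a 1)
      | cons x y => exact ⟨x, y, rfl⟩
    have ht : t ≠ [] := by
      intro hteq
      rw [hrt, hteq] at hlen
      simp at hlen
    have hr0a : r0.1 = a := by
      have := pv_head rest a 1
      rw [hrt] at this
      simpa using this
    have hsum : ((runsFrom a 1 rest).map (fun p => pvIntChar p.1 * ((p.2 : Int) - 1))).sum
        = linSum (a :: rest) := by
      have := pv_runsum rest a 1
      simpa using this
    have hpos : ∀ p ∈ runsFrom a 1 rest, 0 < p.2 := pv_counts rest a 1 Nat.one_pos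
    rw [pv_head rest a 1, pv_last rest a 1]
    by_cases hw : a = (a :: rest).getLast (List.cons_ne_nil a rest)
    · -- first and last run characters match: the runs are merged
      rw [if_pos hw]
      rw [hrt]
      simp only [List.headD_cons, List.tail_cons]
      rw [List.getLastD_cons, pv_getLastD_eq t r0 ht]
      have hlc2 : (a :: rest).getLast (List.cons_ne_nil a rest) = (t.getLast ht).1 := by
        rw [← pv_last rest a 1, hrt, List.getLastD_cons, pv_getLastD_eq t r0 ht]
      rw [hlc2]
      have hposmerge : ∀ p ∈ t.dropLast ++ [((t.getLast ht).1, (t.getLast ht).2 + r0.2)],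
          0 < p.2 := by
        intro p hp
        rcases List.mem_append.mp hp with hp | hp
        · exact hpos p (by rw [hrt]; exact List.mem_cons_of_mem r0 (List.dropLast_subset t hp))
        · simp only [List.mem_singleton] at hp
          subst hp
          have hl2 : 0 < (t.getLast ht).2 :=
            hpos _ (by rw [hrt]; exact List.mem_cons_of_mem r0 (List.getLast_mem ht))
          simpa using Nat.lt_of_lt_of_le hl2 (Nat.le_add_right _ _)
      rw [pv_filter_sum _ hposmerge]
      have hc : r0.1 = (t.getLast ht).1 := hr0a.trans (hw.trans hlc2)
      rw [pv_merge t r0 ht hc, ← hrt, hsum, hr0a, if_pos (hw.trans hlc2)]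
    · rw [if_neg hw, pv_filter_sum _ hpos, hsum, if_neg hw]
      ring

-- ===== VERDICT (by name: the statement is the Claim_ definition above) =====
theorem nextCheck_spec : Claim_equal_nextCheck := by
  intro numbers _ hpre
  obtain ⟨hne, -⟩ := hpre
  unfold Spec_nextCheck
  cases h : numbers.toList with
  | nil => exact absurd h hne
  | cons a rest => rw [pv_A_eq numbers a rest h, pv_B_eq numbers a rest h]
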